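-- pv_equiv track=rewrite | github.com/manwithacat/dazzle | src/dazzle/compliance/analytics/bridge.py | match_topic_glob
-- ===== SOURCE A (Python) =====
-- def match_topic_glob(topic: str, glob: str) -> bool:
--     """Return True iff ``topic`` matches the glob pattern.
--
--     Rules:
--         ``**`` matches any remainder (zero or more segments).
--         ``*`` matches exactly one segment.
--         Literal segments must match exactly.
--     """
--     topic_parts = topic.split(".")
--     glob_parts = glob.split(".")
--
--     i = 0
--     for gp in glob_parts:
--         if gp == "**":
--             # Match everything left.
--             return True
--         if i >= len(topic_parts):
--             return False
--         if gp == "*":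
--             i += 1
--             continue
--         if gp != topic_parts[i]:
--             return False
--         i += 1
--
--     return i == len(topic_parts)
-- ===== SOURCE B (Python) =====
-- def _compile(glob):
--     """Compile the glob into a tiny DFA: (table, open_ended).
--     State q (0..len(table)) expects segment table[q]; state len(table) is
--     accepting, and absorbing ('matches any remainder') iff open_ended."""
--     table = []
--     for seg in glob.split("."):
--         if seg == "**":
--             return table, True
--         table.append(seg)
--     return table, False
--
--
-- def _step(table, open_ended, q, seg):
--     """One DFA transition on a topic segment; None is the dead state."""
--     if q is None:
--         return None
--     if q == len(table):
--         return q if open_ended else None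
--     exp = table[q]
--     return q + 1 if (exp == "*" or exp == seg) else None
--
--
-- def match_topic_glob(topic: str, glob: str) -> bool:
--     table, open_ended = _compile(glob)
--     q = 0
--     for seg in topic.split("."):
--         q = _step(table, open_ended, q, seg)
--     return q == len(table)
-- ===== Notes on version B (the rewrite author's own statement) =====
-- stated objective: alternative
-- what changed: B compiles the glob once into a tiny DFA (a state table plus an open-ended flag) and then folds the topic's segments through the transition function with a dead state, iterating over the topic instead of the glob; A walks the glob parts with an index into the topic and early returns.
import Mathlib
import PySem

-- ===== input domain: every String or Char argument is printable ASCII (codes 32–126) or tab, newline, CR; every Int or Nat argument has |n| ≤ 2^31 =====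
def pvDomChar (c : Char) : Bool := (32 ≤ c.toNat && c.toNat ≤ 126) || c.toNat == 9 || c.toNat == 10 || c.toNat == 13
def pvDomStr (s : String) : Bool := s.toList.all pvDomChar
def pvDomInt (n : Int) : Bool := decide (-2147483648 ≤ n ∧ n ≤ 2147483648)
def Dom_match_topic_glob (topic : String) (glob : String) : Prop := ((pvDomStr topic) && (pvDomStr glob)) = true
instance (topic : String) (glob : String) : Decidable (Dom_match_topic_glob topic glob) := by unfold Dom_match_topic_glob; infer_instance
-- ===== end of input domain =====

-- B compiles the glob into a tiny DFA (state table + open-ended flag) and folds the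
-- topic segments through its transition function; same cost, a different algorithm.


-- s.split(".")  — separator "." ≠ "", so PySem.Str.split? is always `some`; exact
def pySplitDot (s : String) : List String := (PySem.Str.split? s ".").getD []

-- ===== PORT A =====
-- the for-loop over glob_parts with its index i and early returns, as structural recursion
def matchLoopA (ts : List String) : List String → Nat → Bool
  | [], i => i == ts.length
  | gp :: rest, i =>
    if gp == "**" then true
    else if ts.length ≤ i then false
    else if gp == "*" then matchLoopA ts rest (i + 1)
    else if gp != ts.getD i "" then false  -- getD guarded by i < ts.length above, as in Python
    else matchLoopA ts rest (i + 1)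

def match_topic_glob (topic : String) (glob : String) : Bool :=
  matchLoopA (pySplitDot topic) (pySplitDot glob) 0

-- ===== PORT B =====
-- Source B's _compile: the loop over glob segments, stopping at "**", as structural recursion
def compileGlob : List String → List String × Bool
  | [] => ([], false)
  | seg :: rest =>
    if seg == "**" then ([], true)
    else
      let (t, op) := compileGlob rest
      (seg :: t, op)

-- Source B's _step: one DFA transition; `none` is the dead state
def stepAut (table : List String) (openEnded : Bool) (q : Option Nat) (seg : String) : Option Nat :=
  match q with
  | none => none
  | some q =>
    if q == table.length then (if openEnded then some q else none)
    else
      let exp := table.getD q ""  -- guarded by q < table.length above, as in Python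
      if exp == "*" || exp == seg then some (q + 1) else none

def match_topic_glob_alt (topic : String) (glob : String) : Bool :=
  let (table, op) := compileGlob (pySplitDot glob)
  match (pySplitDot topic).foldl (stepAut table op) (some 0) with
  | none => false
  | some q => q == table.length

-- ===== PRECONDITION & SPEC =====
def Spec_match_topic_glob (topic : String) (glob : String) (out : Bool) : Prop := out = match_topic_glob_alt topic glob
instance (topic : String) (glob : String) (out : Bool) : Decidable (Spec_match_topic_glob topic glob out) := by unfold Spec_match_topic_glob; infer_instance

-- ===== CLAIM (what is proved, stated in full; the proofs are below) =====
def Claim_equal_match_topic_glob : Prop := ∀ (topic : String) (glob : String), Dom_match_topic_glob topic glob → Spec_match_topic_glob topic glob (match_topic_glob topic glob)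

-- ===== LEMMAS AND PROOFS =====

-- segment-recursive characterisation of A's loop
def mRec : List String → List String → Bool
  | ts, [] => ts.isEmpty
  | [], g :: _ => g == "**"
  | t :: ts', g :: rest =>
    if g == "**" then true
    else if g == "*" || g == t then mRec ts' rest
    else false

-- the same matcher after compilation: table of literal/"*" segments plus the open flag
def mRec2 : List String → List String → Bool → Bool
  | ts, [], op => op || ts.isEmpty
  | [], _ :: _, _ => false
  | t :: ts', g :: rest, op => (g == "*" || g == t) && mRec2 ts' rest op

theorem matchLoopA_eq_mRec (gs : List String) : ∀ (ts : List String) (i : Nat), i ≤ ts.length →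
    matchLoopA ts gs i = mRec (ts.drop i) gs := by
  induction gs with
  | nil =>
    intro ts i hi
    simp only [matchLoopA, mRec]
    by_cases h : i = ts.length
    · subst h; simp
    · have hemp : (ts.drop i).isEmpty = false := by
        rw [List.isEmpty_eq_false_iff, ← List.length_pos_iff, List.length_drop]; omega
      simp [hemp, h]
  | cons g rest ih =>
    intro ts i hi
    rw [show matchLoopA ts (g :: rest) i =
          (if g == "**" then true
           else if ts.length ≤ i then false
           else if g == "*" then matchLoopA ts rest (i + 1)
           else if g != ts.getD i "" then false
           else matchLoopA ts rest (i + 1)) from rfl]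
    by_cases hstar : g = "**"
    · subst hstar
      cases h : ts.drop i with
      | nil => simp [mRec]
      | cons t ts' => simp [mRec]
    · rw [if_neg (by simpa using hstar)]
      rcases Nat.lt_or_ge i ts.length with hlt | hge
      · have hdrop : ts.drop i = ts[i] :: ts.drop (i + 1) := List.drop_eq_getElem_cons hlt
        have hgetD : ts.getD i "" = ts[i] := List.getD_eq_getElem ts "" hlt
        rw [if_neg (by omega), hgetD, hdrop]
        rw [show mRec (ts[i] :: ts.drop (i + 1)) (g :: rest) =
              (if g == "**" then true
               else if g == "*" || g == ts[i] then mRec (ts.drop (i + 1)) rest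
               else false) from rfl]
        have ih' := ih ts (i + 1) hlt
        by_cases h1 : g = "*"
        · subst h1; simp [ih']
        · by_cases h2 : g = ts[i]
          · simp [← h2, hstar, ih']
          · simp [hstar, h1, h2]
      · have hdrop : ts.drop i = [] := List.drop_eq_nil_iff.mpr hge
        rw [if_pos hge, hdrop]
        simp [mRec, hstar]

-- compiling the glob preserves the matcher
theorem mRec_eq_mRec2 (gs : List String) : ∀ (ts : List String),
    mRec ts gs = mRec2 ts (compileGlob gs).1 (compileGlob gs).2 := by
  induction gs with
  | nil => intro ts; cases ts <;> simp [mRec, mRec2, compileGlob]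
  | cons g rest ih =>
    intro ts
    by_cases hstar : g = "**"
    · subst hstar
      cases ts <;> simp [mRec, mRec2, compileGlob]
    · have hc : compileGlob (g :: rest) =
          (g :: (compileGlob rest).1, (compileGlob rest).2) := by
        simp [compileGlob, hstar]
      rw [hc]
      cases ts with
      | nil => simp [mRec, mRec2, hstar]
      | cons t ts' =>
        rw [show mRec (t :: ts') (g :: rest) =
              (if g == "**" then true
               else if g == "*" || g == t then mRec ts' rest else false) from rfl]
        rw [if_neg (by simpa using hstar)]
        rw [show mRec2 (t :: ts') (g :: (compileGlob rest).1) (compileGlob rest).2 =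
              ((g == "*" || g == t) && mRec2 ts' (compileGlob rest).1 (compileGlob rest).2) from rfl]
        by_cases hm : (g == "*" || g == t) = true
        · rw [if_pos hm, hm, Bool.true_and, ih]
        · rw [if_neg hm]
          simp only [Bool.not_eq_true] at hm
          rw [hm, Bool.false_and]

theorem foldl_step_none (table : List String) (op : Bool) (ts : List String) :
    ts.foldl (stepAut table op) none = none := by
  induction ts with
  | nil => rfl
  | cons t ts ih => simpa [stepAut] using ih

theorem foldl_step_absorb (table : List String) (ts : List String) :
    ts.foldl (stepAut table true) (some table.length) = some table.length := by
  induction ts with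
  | nil => rfl
  | cons t ts ih => simpa [stepAut] using ih

-- the automaton run computes the compiled matcher
theorem foldl_step_eq_mRec2 (table : List String) (op : Bool) :
    ∀ (ts : List String) (q : Nat), q ≤ table.length →
    (match ts.foldl (stepAut table op) (some q) with
     | none => false
     | some r => r == table.length) = mRec2 ts (table.drop q) op := by
  intro ts
  induction ts with
  | nil =>
    intro q hq
    by_cases h : q = table.length
    · subst h; simp [mRec2]
    · have hd : table.drop q = table[q] :: table.drop (q + 1) :=
        List.drop_eq_getElem_cons (by omega)
      rw [hd]
      simp only [List.foldl_nil]
      rw [show mRec2 [] (table[q] :: table.drop (q + 1)) op = false from rfl]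
      simp [h]
  | cons t ts ih =>
    intro q hq
    by_cases h : q = table.length
    · subst h
      have hd : table.drop table.length = [] := by simp
      rw [hd]
      cases op with
      | true =>
        rw [show (t :: ts).foldl (stepAut table true) (some table.length) =
              some table.length from foldl_step_absorb table (t :: ts)]
        simp [mRec2]
      | false =>
        rw [show (t :: ts).foldl (stepAut table false) (some table.length) =
              ts.foldl (stepAut table false) (stepAut table false (some table.length) t) from rfl]
        rw [show stepAut table false (some table.length) t = none by simp [stepAut]]
        rw [foldl_step_none]
        simp [mRec2]
    · have hlt : q < table.length := by omega
      have hd : table.drop q = table[q] :: table.drop (q + 1) :=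
        List.drop_eq_getElem_cons hlt
      have hgetD : table.getD q "" = table[q] := List.getD_eq_getElem table "" hlt
      rw [hd]
      rw [show (t :: ts).foldl (stepAut table op) (some q) =
            ts.foldl (stepAut table op) (stepAut table op (some q) t) from rfl]
      rw [show stepAut table op (some q) t =
            (if q == table.length then (if op then some q else none)
             else if table.getD q "" == "*" || table.getD q "" == t then some (q + 1) else none)
            from rfl]
      rw [if_neg (by simpa using h), hgetD]
      rw [show mRec2 (t :: ts) (table[q] :: table.drop (q + 1)) op =
            ((table[q] == "*" || table[q] == t) && mRec2 ts (table.drop (q + 1)) op) from rfl]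
      by_cases hm : (table[q] == "*" || table[q] == t) = true
      · rw [if_pos hm, hm, Bool.true_and, ih (q + 1) hlt]
      · rw [if_neg hm]
        simp only [Bool.not_eq_true] at hm
        rw [hm, Bool.false_and, foldl_step_none]

-- ===== VERDICT (by name: the statement is the Claim_ definition above) =====
theorem match_topic_glob_spec : Claim_equal_match_topic_glob := by
  intro topic glob _
  unfold Spec_match_topic_glob match_topic_glob match_topic_glob_alt
  rcases hcp : compileGlob (pySplitDot glob) with ⟨table, op⟩
  rw [matchLoopA_eq_mRec _ _ 0 (Nat.zero_le _), List.drop_zero, mRec_eq_mRec2, hcp]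
  have h := foldl_step_eq_mRec2 table op (pySplitDot topic) 0 (Nat.zero_le _)
  rw [List.drop_zero] at h
  simpa using h.symm
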